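-- pv_equiv track=rewrite | github.com/Curt-Park/TIL | algorithm/array/single_riffle_check.py | is_riffled_once
-- ===== SOURCE A (Python) =====
-- def is_riffled_once(shuffled_deck, half1, half2):
--     """
--     >>> is_riffled_once([], [], [])
--     True
--     >>> is_riffled_once([1, 2, 3, 4], [1, 2, 3, 4], [])
--     True
--     >>> is_riffled_once([1, 2, 3, 4], [], [1, 2, 3, 4])
--     True
--     >>> is_riffled_once([1, 2, 3, 4], [1, 2], [3, 4])
--     True
--     >>> is_riffled_once([1, 2, 3, 4], [1, 3], [2, 4])
--     True
--     >>> is_riffled_once([1, 2, 3, 4], [2, 1], [3, 4])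
--     False
--     >>> is_riffled_once([1, 2, 3, 4], [1, 2, 5], [3, 4])
--     False
--     """
--     n, n1, n2 = len(shuffled_deck), len(half1), len(half2)
--
--     if n != n1 + n2:
--         return False
--
--     j, k = 0, 0
--     for i in range(n):
--         if j < n1 and shuffled_deck[i] == half1[j]:
--             j += 1
--         elif k < n2 and shuffled_deck[i] == half2[k]:
--             k += 1
--         else:
--             return False
--
--     return True
-- ===== SOURCE B (Python) =====
-- def is_riffled_once(shuffled_deck, half1, half2):
--     j = 0
--     leftover = []
--     for x in shuffled_deck:
--         if j < len(half1) and x == half1[j]: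
--             j += 1
--         else:
--             leftover.append(x)
--     return j == len(half1) and leftover == half2
-- ===== Notes on version B (the rewrite author's own statement) =====
-- stated objective: simpler
-- what changed: Replaces the simultaneous two-pointer merge with early-exit and the upfront length check by a single pass that greedily consumes half1 with one pointer and collects every other element, then one final comparison j == len(half1) and leftover == half2.
import Mathlib
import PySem

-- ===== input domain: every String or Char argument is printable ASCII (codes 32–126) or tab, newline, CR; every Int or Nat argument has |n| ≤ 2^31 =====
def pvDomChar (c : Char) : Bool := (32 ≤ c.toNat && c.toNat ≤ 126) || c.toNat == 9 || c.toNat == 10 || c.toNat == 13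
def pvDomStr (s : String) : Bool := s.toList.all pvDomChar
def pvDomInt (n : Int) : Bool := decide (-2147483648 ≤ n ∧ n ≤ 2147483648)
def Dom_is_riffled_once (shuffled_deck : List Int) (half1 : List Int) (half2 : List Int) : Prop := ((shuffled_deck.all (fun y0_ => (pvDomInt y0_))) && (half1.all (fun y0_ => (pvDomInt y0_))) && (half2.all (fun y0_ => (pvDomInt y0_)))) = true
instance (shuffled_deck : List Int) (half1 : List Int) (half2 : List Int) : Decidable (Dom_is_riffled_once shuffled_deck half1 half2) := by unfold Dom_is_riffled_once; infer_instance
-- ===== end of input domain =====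

-- B replaces A's simultaneous two-pointer merge (with upfront length check and early exit)
-- by one pass that greedily consumes half1 and collects the leftovers, then a final comparison.

-- ===== PORT A =====
-- the for-loop over range(n) with state (j, k) and early 'return False'
def pvALoop (half1 : List Int) (half2 : List Int) : List Int → Nat → Nat → Bool
  | [], _, _ => true
  | x :: ds, j, k =>
    if j < half1.length ∧ half1.getD j 0 = x then pvALoop half1 half2 ds (j + 1) k
    else if k < half2.length ∧ half2.getD k 0 = x then pvALoop half1 half2 ds j (k + 1)
    else false

def is_riffled_once (shuffled_deck : List Int) (half1 : List Int) (half2 : List Int) : Bool :=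
  if shuffled_deck.length ≠ half1.length + half2.length then false
  else pvALoop half1 half2 shuffled_deck 0 0

-- ===== PORT B =====
-- the for-loop over the deck with state (j, leftover)
def is_riffled_once_alt (shuffled_deck : List Int) (half1 : List Int) (half2 : List Int) : Bool :=
  let s := shuffled_deck.foldl
    (fun (st : Nat × List Int) x =>
      if st.1 < half1.length ∧ half1.getD st.1 0 = x then (st.1 + 1, st.2)
      else (st.1, st.2 ++ [x]))
    (0, [])
  s.1 == half1.length && s.2 == half2

-- ===== PRECONDITION & SPEC =====
def Spec_is_riffled_once (shuffled_deck : List Int) (half1 : List Int) (half2 : List Int) (out : Bool) : Prop := out = is_riffled_once_alt shuffled_deck half1 half2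
instance (shuffled_deck : List Int) (half1 : List Int) (half2 : List Int) (out : Bool) : Decidable (Spec_is_riffled_once shuffled_deck half1 half2 out) := by unfold Spec_is_riffled_once; infer_instance

-- ===== CLAIM (what is proved, stated in full; the proofs are below) =====
def Claim_equal_is_riffled_once : Prop := ∀ (shuffled_deck : List Int) (half1 : List Int) (half2 : List Int), Dom_is_riffled_once shuffled_deck half1 half2 → Spec_is_riffled_once shuffled_deck half1 half2 (is_riffled_once shuffled_deck half1 half2)

-- ===== LEMMAS AND PROOFS =====

-- recursive view of B's fold (proof helper)
def pvBRun (half1 : List Int) : List Int → Nat → Nat × List Int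
  | [], j => (j, [])
  | x :: ds, j =>
    if j < half1.length ∧ half1.getD j 0 = x then pvBRun half1 ds (j + 1)
    else
      let r := pvBRun half1 ds j
      (r.1, x :: r.2)

theorem pvB_foldl_eq (half1 : List Int) :
    ∀ (deck : List Int) (j : Nat) (acc : List Int),
      deck.foldl
        (fun (st : Nat × List Int) x =>
          if st.1 < half1.length ∧ half1.getD st.1 0 = x then (st.1 + 1, st.2)
          else (st.1, st.2 ++ [x]))
        (j, acc)
      = ((pvBRun half1 deck j).1, acc ++ (pvBRun half1 deck j).2) := by
  intro deck
  induction deck with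
  | nil => intro j acc; simp [pvBRun]
  | cons x ds ih =>
    intro j acc
    simp only [pvBRun, List.foldl_cons]
    by_cases h : j < half1.length ∧ half1.getD j 0 = x
    · rw [if_pos h, if_pos h, ih]
    · rw [if_neg h, if_neg h, ih]
      simp

theorem pvBRun_len (half1 : List Int) :
    ∀ (deck : List Int) (j : Nat),
      (pvBRun half1 deck j).1 + (pvBRun half1 deck j).2.length = j + deck.length := by
  intro deck
  induction deck with
  | nil => intro j; simp [pvBRun]
  | cons x ds ih =>
    intro j
    simp only [pvBRun]
    by_cases h : j < half1.length ∧ half1.getD j 0 = x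
    · rw [if_pos h]; have := ih (j + 1); simp at this ⊢; omega
    · rw [if_neg h]; have := ih j; simp at this ⊢; omega

-- core invariant: on a run with matching remaining lengths, A's loop agrees with
-- comparing B's leftovers against the unconsumed suffix of half2
theorem pvLoop_eq (half1 half2 : List Int) :
    ∀ (deck : List Int) (j k : Nat),
      j ≤ half1.length → k ≤ half2.length →
      deck.length + j + k = half1.length + half2.length →
      pvALoop half1 half2 deck j k
        = ((pvBRun half1 deck j).1 == half1.length && (pvBRun half1 deck j).2 == half2.drop k) := by
  intro deck
  induction deck with
  | nil =>
    intro j k hj hk hlen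
    have hj' : j = half1.length := by simp at hlen; omega
    have hk' : k = half2.length := by simp at hlen; omega
    simp [pvALoop, pvBRun, hj', hk']
  | cons x ds ih =>
    intro j k hj hk hlen
    simp only [pvALoop, pvBRun]
    by_cases h1 : j < half1.length ∧ half1.getD j 0 = x
    · rw [if_pos h1, if_pos h1]
      exact ih (j + 1) k h1.1 hk (by simp at hlen ⊢; omega)
    · rw [if_neg h1, if_neg h1]
      by_cases h2 : k < half2.length ∧ half2.getD k 0 = x
      · rw [if_pos h2]
        have hdrop : half2.drop k = x :: half2.drop (k + 1) := by
          rw [List.drop_eq_getElem_cons h2.1]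
          have : half2[k] = half2.getD k 0 := (List.getD_eq_getElem half2 0 h2.1).symm
          rw [this, h2.2]
        rw [ih j (k + 1) hj h2.1 (by simp at hlen ⊢; omega), hdrop]
        simp
      · rw [if_neg h2]
        by_cases hk' : k < half2.length
        · have hne : x ≠ half2.getD k 0 := fun he => h2 ⟨hk', he.symm⟩
          have hdrop : half2.drop k = half2.getD k 0 :: half2.drop (k + 1) := by
            rw [List.drop_eq_getElem_cons hk']
            rw [(List.getD_eq_getElem half2 0 hk').symm]
          rw [hdrop]
          simp
          intro _ he _
          exact hne he
        · have hkk : k = half2.length := by omega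
          have hdrop : half2.drop k = [] := by simp [hkk]
          rw [hdrop]
          simp

theorem pv_main (shuffled_deck half1 half2 : List Int) :
    is_riffled_once shuffled_deck half1 half2 = is_riffled_once_alt shuffled_deck half1 half2 := by
  unfold is_riffled_once is_riffled_once_alt
  rw [pvB_foldl_eq half1 shuffled_deck 0 []]
  by_cases hlen : shuffled_deck.length = half1.length + half2.length
  · rw [if_neg (by omega)]
    have := pvLoop_eq half1 half2 shuffled_deck 0 0 (by omega) (by omega) (by omega)
    simpa using this
  · rw [if_pos (by omega)]
    -- B must also reject: lengths cannot work out
    have hlen2 := pvBRun_len half1 shuffled_deck 0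
    by_cases hb1 : (pvBRun half1 shuffled_deck 0).1 = half1.length
    · by_cases hb2 : (pvBRun half1 shuffled_deck 0).2 = half2
      · exfalso; apply hlen; rw [hb1, hb2] at hlen2; omega
      · simp [hb2]
    · simp [hb1]

-- ===== VERDICT (by name: the statement is the Claim_ definition above) =====
theorem is_riffled_once_spec : Claim_equal_is_riffled_once := by
  intro shuffled_deck half1 half2 _
  exact pv_main shuffled_deck half1 half2
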